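-- pv_equiv track=rewrite | github.com/pypi-data/pypi-mirror-324 | packages/oracle-ads/oracle_ads-2.12.10rc0-py3-none-any.whl/ads/aqua/common/utils.py | parse_cmd_var
-- ===== SOURCE A (Python) =====
-- from typing import List, Union
--
-- def parse_cmd_var(cmd_list: List[str]) -> dict:
--     """Helper functions that parses a list into a key-value dictionary. The list contains keys separated by the prefix
--     '--' and the value of the key is the subsequent element.
--     """
--     parsed_cmd = {}
--
--     for i, cmd in enumerate(cmd_list):
--         if cmd.startswith("--"):
--             if i + 1 < len(cmd_list) and not cmd_list[i + 1].startswith("--"):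
--                 parsed_cmd[cmd] = cmd_list[i + 1]
--                 i += 1
--             else:
--                 parsed_cmd[cmd] = None
--     return parsed_cmd
-- ===== SOURCE B (Python) =====
-- def parse_cmd_var(cmd_list):
--     """Two staged passes: first collect the positions of all '--' keys, then build
--     the dict with one comprehension over consecutive key positions: a key at p has
--     a value exactly when the next position p+1 lies strictly before the next key
--     position (or before the end of the list, for the last key)."""
--     n = len(cmd_list)
--     ks = [i for i, tok in enumerate(cmd_list) if tok.startswith("--")]
--     return {cmd_list[p]: (cmd_list[p + 1] if p + 1 < q else None)
--             for p, q in zip(ks, ks[1:] + [n])}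
-- ===== Notes on version B (the rewrite author's own statement) =====
-- stated objective: alternative
-- what changed: Replaces A's single scan with per-element lookahead by two staged passes: collect all '--' key positions first, then build the dict with one comprehension over consecutive key positions, deciding value-vs-None by comparing p+1 with the next key position instead of re-testing startswith.
import Mathlib
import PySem

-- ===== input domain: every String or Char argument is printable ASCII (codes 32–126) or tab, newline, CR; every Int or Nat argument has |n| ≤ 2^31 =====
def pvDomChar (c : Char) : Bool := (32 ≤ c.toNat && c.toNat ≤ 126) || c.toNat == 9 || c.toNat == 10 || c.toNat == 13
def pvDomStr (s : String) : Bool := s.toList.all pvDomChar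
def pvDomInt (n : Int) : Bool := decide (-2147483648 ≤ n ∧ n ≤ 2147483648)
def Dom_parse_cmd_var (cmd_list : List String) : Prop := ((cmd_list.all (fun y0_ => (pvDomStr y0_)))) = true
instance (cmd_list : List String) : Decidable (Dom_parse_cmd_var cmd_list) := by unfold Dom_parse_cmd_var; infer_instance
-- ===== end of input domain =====

-- B replaces A's single scan with per-element lookahead by two staged passes (collect all
-- '--' key positions, then one comprehension over consecutive key positions); same O(n) cost.

-- ===== PORT A =====
-- one loop step of A: for (i, cmd), keyed lookahead cmd_list[i+1]; 'i + 1 < len' together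
-- with the subsequent cmd_list[i+1] is exactly 'pyGet? cmd_list (i+1) = some _' since i ≥ 0
def parseAStep (cmd_list : List String) (d : PySem.Dict String (Option String))
    (p : Int × String) : PySem.Dict String (Option String) :=
  if PySem.Str.startswith p.2 "--" then
    match PySem.List.pyGet? cmd_list (p.1 + 1) with
    | some nxt =>
        if ¬ PySem.Str.startswith nxt "--" then d.insert p.2 (some nxt)
        else d.insert p.2 none
    | none => d.insert p.2 none
  else d

def parse_cmd_var (cmd_list : List String) : List (String × Option String) :=
  ((PySem.List.enumerate cmd_list).foldl (parseAStep cmd_list) PySem.Dict.empty).items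

-- ===== PORT B =====
-- pass 1 of Source B: ks = [i for i, tok in enumerate(cmd_list) if tok.startswith("--")]
def keyIdxs (cmd_list : List String) (s : Int) : List Int :=
  ((PySem.List.enumerate cmd_list s).filter (fun p => PySem.Str.startswith p.2 "--")).map Prod.fst
-- one entry of the dict comprehension; cmd_list[p] is always in range, so pyGetD is exact here
def bStep (cmd_list : List String) (d : PySem.Dict String (Option String))
    (pq : Int × Int) : PySem.Dict String (Option String) :=
  d.insert (PySem.List.pyGetD cmd_list pq.1 "")
    (if pq.1 + 1 < pq.2 then some (PySem.List.pyGetD cmd_list (pq.1 + 1) "") else none)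

def parse_cmd_var_alt (cmd_list : List String) : List (String × Option String) :=
  let ks := keyIdxs cmd_list 0
  ((ks.zip (ks.drop 1 ++ [(cmd_list.length : Int)])).foldl (bStep cmd_list) PySem.Dict.empty).items

-- ===== PRECONDITION & SPEC =====
def Spec_parse_cmd_var (cmd_list : List String) (out : List (String × Option String)) : Prop := out = parse_cmd_var_alt cmd_list
instance (cmd_list : List String) (out : List (String × Option String)) : Decidable (Spec_parse_cmd_var cmd_list out) := by unfold Spec_parse_cmd_var; infer_instance

-- ===== CLAIM (what is proved, stated in full; the proofs are below) =====
def Claim_equal_parse_cmd_var : Prop := ∀ (cmd_list : List String), Dom_parse_cmd_var cmd_list → Spec_parse_cmd_var cmd_list (parse_cmd_var cmd_list)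

-- ===== LEMMAS AND PROOFS =====

-- proof-only reference recursion: both ports' folds are shown equal to this tokenizer
def specRec : List String → PySem.Dict String (Option String) → PySem.Dict String (Option String)
  | [], d => d
  | [c], d => if PySem.Str.startswith c "--" then d.insert c none else d
  | c :: nxt :: rest, d =>
    if PySem.Str.startswith c "--" then
      if ¬ PySem.Str.startswith nxt "--" then specRec rest (d.insert c (some nxt))
      else specRec (nxt :: rest) (d.insert c none)
    else specRec (nxt :: rest) d

-- A's fold over the suffix starting at index k equals the reference tokenizer on that suffix.
lemma parse_suffix_eq (L : List String) :
    ∀ (suffix : List String) (k : Nat) (d : PySem.Dict String (Option String)),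
      L.drop k = suffix →
      (PySem.List.enumerate suffix (k : Int)).foldl (parseAStep L) d = specRec suffix d
  | [], _, d, _ => by simp [PySem.List.enumerate_nil, specRec]
  | [c], k, d, h => by
      have hget : PySem.List.pyGet? L ((k : Int) + 1) = none := by
        have h1 : L[k+1]? = none := by
          rw [← List.head?_drop, List.drop_add_one_eq_tail_drop, h]; rfl
        have hcast : ((k : Int) + 1) = ((k + 1 : Nat) : Int) := by push_cast; ring
        rw [hcast, PySem.List.pyGet?_natCast, h1]
      simp [PySem.List.enumerate_cons, PySem.List.enumerate_nil, parseAStep, specRec, hget]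
  | c :: nxt :: rest, k, d, h => by
      have hdrop1 : L.drop (k + 1) = nxt :: rest := by
        rw [List.drop_add_one_eq_tail_drop, h]; rfl
      have hdrop2 : L.drop (k + 2) = rest := by
        rw [show k + 2 = (k + 1) + 1 from rfl, List.drop_add_one_eq_tail_drop, hdrop1]; rfl
      have hget : PySem.List.pyGet? L ((k : Int) + 1) = some nxt := by
        have h1 : L[k+1]? = some nxt := by
          rw [← List.head?_drop, hdrop1]; rfl
        have hcast : ((k : Int) + 1) = ((k + 1 : Nat) : Int) := by push_cast; ring
        rw [hcast, PySem.List.pyGet?_natCast, h1]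
      rw [PySem.List.enumerate_cons]
      simp only [List.foldl_cons]
      by_cases hc : PySem.Str.startswith c "--"
      · by_cases hn : PySem.Str.startswith nxt "--"
        · have ih := parse_suffix_eq L (nxt :: rest) (k + 1) (d.insert c none) hdrop1
          simp only [parseAStep, hget, hc, hn, if_true, if_false, not_true, specRec]
          simpa [Int.natCast_succ] using ih
        · have ih := parse_suffix_eq L rest (k + 2) (d.insert c (some nxt)) hdrop2
          rw [PySem.List.enumerate_cons]
          simp only [List.foldl_cons]
          simp only [parseAStep, hget, hc, hn, specRec, if_pos]
          simpa [Int.natCast_succ, add_assoc] using ih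
      · have ih := parse_suffix_eq L (nxt :: rest) (k + 1) d hdrop1
        simp only [parseAStep, hc, specRec]
        simpa [Int.natCast_succ] using ih

lemma keyIdxs_nil (s : Int) : keyIdxs [] s = [] := by
  simp [keyIdxs, PySem.List.enumerate_nil]

lemma keyIdxs_cons (c : String) (S : List String) (s : Int) :
    keyIdxs (c :: S) s =
      (if PySem.Chars.startswith c.toList ['-', '-'] = true then [s] else []) ++ keyIdxs S (s + 1) := by
  by_cases hc : PySem.Chars.startswith c.toList ['-', '-'] = true <;>
    simp [keyIdxs, PySem.List.enumerate_cons, hc]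

lemma keyIdxs_ge (S : List String) : ∀ (s x : Int), x ∈ keyIdxs S s → s ≤ x := by
  induction S with
  | nil => intro s x hx; simp [keyIdxs_nil] at hx
  | cons c S ih =>
      intro s x hx
      rw [keyIdxs_cons] at hx
      rcases List.mem_append.1 hx with h | h
      · split at h <;> simp_all
      · have := ih (s + 1) x h; omega

lemma zip_cons_succ (a n : Int) (t : List Int) :
    (a :: t).zip (t ++ [n]) = (a, t.headD n) :: t.zip (t.drop 1 ++ [n]) := by
  cases t <;> rfl

-- key lookup: the element at a dropped position
lemma pyGetD_of_drop (L : List String) (k : Nat) (c : String) (S : List String)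
    (h : L.drop k = c :: S) : PySem.List.pyGetD L (k : Int) "" = c := by
  have h1 : L[k]? = some c := by rw [← List.head?_drop, h]; rfl
  rw [PySem.List.pyGetD_natCast]
  simp [List.getD, h1]

-- B's fold over the key positions of the suffix starting at k equals the reference tokenizer.
lemma parse_alt_suffix_eq (L : List String) :
    ∀ (suffix : List String) (k : Nat) (d : PySem.Dict String (Option String)),
      L.drop k = suffix →
      ((keyIdxs suffix (k : Int)).zip
        ((keyIdxs suffix (k : Int)).drop 1 ++ [(L.length : Int)])).foldl (bStep L) d
        = specRec suffix d
  | [], _, d, _ => by simp [keyIdxs_nil, specRec]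
  | [c], k, d, h => by
      have hlen : L.length = k + 1 := by
        have := congrArg List.length h; simp at this; omega
      have hc0 := pyGetD_of_drop L k c [] h
      by_cases hc : PySem.Chars.startswith c.toList ['-', '-'] = true <;>
        simp [keyIdxs_cons, keyIdxs_nil, hc, specRec, bStep, hlen, hc0]
  | c :: nxt :: rest, k, d, h => by
      have hdrop1 : L.drop (k + 1) = nxt :: rest := by
        rw [List.drop_add_one_eq_tail_drop, h]; rfl
      have hdrop2 : L.drop (k + 2) = rest := by
        rw [show k + 2 = (k + 1) + 1 from rfl, List.drop_add_one_eq_tail_drop, hdrop1]; rfl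
      have hlen : (k : Int) + 2 ≤ (L.length : Int) := by
        have := congrArg List.length h; simp at this; omega
      have hc0 := pyGetD_of_drop L k c (nxt :: rest) h
      have hn0 := pyGetD_of_drop L (k + 1) nxt rest hdrop1
      by_cases hc : PySem.Chars.startswith c.toList ['-', '-'] = true
      · by_cases hn : PySem.Chars.startswith nxt.toList ['-', '-'] = true
        · -- next token is a key: head of the tail key list is k+1, so no value for c
          have ih := parse_alt_suffix_eq L (nxt :: rest) (k + 1) (d.insert c none) hdrop1
          rw [keyIdxs_cons, if_pos hc, List.singleton_append]
          simp only [List.drop_succ_cons, List.drop_zero]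
          rw [zip_cons_succ, List.foldl_cons]
          have hhead : (keyIdxs (nxt :: rest) ((k : Int) + 1)).headD (L.length : Int)
              = (k : Int) + 1 := by
            rw [keyIdxs_cons, if_pos hn]; rfl
          have hstep : bStep L d ((k : Int), (k : Int) + 1) = d.insert c none := by
            simp [bStep, hc0]
          rw [hhead, hstep]
          have hrec : specRec (c :: nxt :: rest) d = specRec (nxt :: rest) (d.insert c none) := by
            simp [specRec, hc, hn]
          rw [hrec]
          simpa [Int.natCast_succ] using ih
        · -- next token is a value: every later key position is ≥ k+2, so a value is taken
          have ih := parse_alt_suffix_eq L rest (k + 2) (d.insert c (some nxt)) hdrop2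
          rw [keyIdxs_cons, if_pos hc, List.singleton_append]
          simp only [List.drop_succ_cons, List.drop_zero]
          rw [zip_cons_succ, List.foldl_cons]
          have hkeq : keyIdxs (nxt :: rest) ((k : Int) + 1) = keyIdxs rest ((k : Int) + 2) := by
            rw [keyIdxs_cons, if_neg hn, List.nil_append]; ring_nf
          have hq : (k : Int) + 1 < (keyIdxs (nxt :: rest) ((k : Int) + 1)).headD (L.length : Int) := by
            rw [hkeq]
            cases hk : keyIdxs rest ((k : Int) + 2) with
            | nil => simpa using hlen
            | cons q t =>
                have hq2 : (k : Int) + 2 ≤ q := by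
                  apply keyIdxs_ge rest ((k : Int) + 2) q; rw [hk]; exact List.mem_cons_self ..
                simp; omega
          have hstep : bStep L d ((k : Int),
              (keyIdxs (nxt :: rest) ((k : Int) + 1)).headD (L.length : Int))
              = d.insert c (some nxt) := by
            have hv : PySem.List.pyGetD L ((k : Int) + 1) "" = nxt := by
              have hcast : ((k : Int) + 1) = ((k + 1 : Nat) : Int) := by push_cast; ring
              rw [hcast]; exact hn0
            simp only [bStep, hc0, hv]
            rw [if_pos (by simpa [List.headD] using hq)]
          rw [hstep, hkeq]
          have hrec : specRec (c :: nxt :: rest) d = specRec rest (d.insert c (some nxt)) := by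
            simp [specRec, hc, hn]
          rw [hrec]
          have hcast2 : ((k : Int) + 2) = (((k + 2 : Nat)) : Int) := by push_cast; ring
          rw [hcast2]
          exact ih
      · have ih := parse_alt_suffix_eq L (nxt :: rest) (k + 1) d hdrop1
        rw [keyIdxs_cons, if_neg hc, List.nil_append]
        have hrec : specRec (c :: nxt :: rest) d = specRec (nxt :: rest) d := by
          simp [specRec, hc]
        rw [hrec]
        simpa [Int.natCast_succ] using ih

-- ===== VERDICT (by name: the statement is the Claim_ definition above) =====
theorem parse_cmd_var_spec : Claim_equal_parse_cmd_var := by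
  intro cmd_list _
  unfold Spec_parse_cmd_var parse_cmd_var parse_cmd_var_alt
  rw [show (PySem.List.enumerate cmd_list : List (Int × String)) =
        PySem.List.enumerate (cmd_list.drop 0) ((0 : Nat) : Int) by simp,
      parse_suffix_eq cmd_list (cmd_list.drop 0) 0 PySem.Dict.empty rfl]
  have hb := parse_alt_suffix_eq cmd_list (cmd_list.drop 0) 0 PySem.Dict.empty rfl
  simp only [List.drop_zero] at hb ⊢
  rw [show ((0 : Nat) : Int) = (0 : Int) from rfl] at hb
  rw [hb]
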